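-- pv_equiv track=rewrite | github.com/LuFi-1227/Projetos-em-Intelig-ncia-Artificial | Algoritmo Genetico/Auxiliate.py | JaFoi
-- ===== SOURCE A (Python) =====
-- def JaFoi(Pop, n, p):
--   i = 0
--   while i < len(Pop)-1:
--     if (n == Pop[i]):
--       return 2
--     if (p == Pop[i]):
--       return 1
--     i = i + 1
--   return -1
-- ===== SOURCE B (Python) =====
-- def JaFoi(Pop, n, p):
--     body = Pop[:-1]
--     try:
--         idx_n = body.index(n)
--     except ValueError:
--         idx_n = len(body)
--     try:
--         idx_p = body.index(p)
--     except ValueError: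
--         idx_p = len(body)
--     if idx_n == len(body) and idx_p == len(body):
--         return -1
--     return 2 if idx_n <= idx_p else 1
-- ===== Notes on version B (the rewrite author's own statement) =====
-- stated objective: alternative
-- what changed: Replaces the single combined index-while loop with two independent first-index searches over Pop[:-1] followed by a position comparison (n wins ties).
import Mathlib
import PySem

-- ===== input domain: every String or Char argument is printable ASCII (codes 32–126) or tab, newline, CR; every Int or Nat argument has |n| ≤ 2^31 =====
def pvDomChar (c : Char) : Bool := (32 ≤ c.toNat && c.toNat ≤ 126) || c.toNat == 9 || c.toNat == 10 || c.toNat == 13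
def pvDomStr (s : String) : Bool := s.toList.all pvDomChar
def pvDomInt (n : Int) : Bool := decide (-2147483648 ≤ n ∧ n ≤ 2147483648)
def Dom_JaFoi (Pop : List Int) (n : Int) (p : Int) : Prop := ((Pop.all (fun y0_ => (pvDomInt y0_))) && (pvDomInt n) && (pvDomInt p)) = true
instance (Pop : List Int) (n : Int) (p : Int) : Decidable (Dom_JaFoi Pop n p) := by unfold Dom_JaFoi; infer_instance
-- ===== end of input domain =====

-- B replaces A's combined priority scan by two independent first-index searches over Pop[:-1]
-- plus a position comparison (objective: alternative decomposition, same cost).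

-- ===== PORT A =====
-- A's while loop over index i; Pop[i] is always in range when the guard holds, so pyGetD is exact here.
def JaFoiGo (Pop : List Int) (n : Int) (p : Int) (i : Nat) : Int :=
  if _h : (i : Int) < (Pop.length : Int) - 1 then
    if n = PySem.List.pyGetD Pop (i : Int) 0 then 2
    else if p = PySem.List.pyGetD Pop (i : Int) 0 then 1
    else JaFoiGo Pop n p (i + 1)
  else -1
termination_by Pop.length - i
decreasing_by omega

def JaFoi (Pop : List Int) (n : Int) (p : Int) : Int := JaFoiGo Pop n p 0

-- ===== PORT B =====
def JaFoi_alt (Pop : List Int) (n : Int) (p : Int) : Int :=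
  let body := PySem.List.slice Pop none (some (-1))
  let idxN := (PySem.List.index? body n).getD body.length
  let idxP := (PySem.List.index? body p).getD body.length
  if idxN = body.length ∧ idxP = body.length then -1
  else if idxN ≤ idxP then 2 else 1

-- ===== PRECONDITION & SPEC =====
def Spec_JaFoi (Pop : List Int) (n : Int) (p : Int) (out : Int) : Prop := out = JaFoi_alt Pop n p
instance (Pop : List Int) (n : Int) (p : Int) (out : Int) : Decidable (Spec_JaFoi Pop n p out) := by unfold Spec_JaFoi; infer_instance

-- ===== CLAIM (what is proved, stated in full; the proofs are below) =====
def Claim_equal_JaFoi : Prop := ∀ (Pop : List Int) (n : Int) (p : Int), Dom_JaFoi Pop n p → Spec_JaFoi Pop n p (JaFoi Pop n p)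

-- ===== LEMMAS AND PROOFS =====

-- reference scan over the body list (A's algorithm rephrased structurally)
def pvScan (n p : Int) : List Int → Int
  | [] => -1
  | x :: xs => if n = x then 2 else if p = x then 1 else pvScan n p xs

-- A's index loop equals the structural scan over the remaining suffix of Pop.dropLast
lemma jaFoiGo_eq_scan (Pop : List Int) (n p : Int) (i : Nat) :
    JaFoiGo Pop n p i = pvScan n p (Pop.dropLast.drop i) := by
  rw [JaFoiGo]
  by_cases h : (i : Int) < (Pop.length : Int) - 1
  · have hlen : i < Pop.length - 1 := by omega
    have hlt : i < Pop.dropLast.length := by simp [List.length_dropLast]; omega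
    have hget : PySem.List.pyGetD Pop (i : Int) 0 = Pop.dropLast[i] := by
      rw [PySem.List.pyGetD_natCast]
      have : Pop.getD i 0 = Pop[i]'(by omega) := List.getD_eq_getElem _ _ (by omega)
      rw [this, List.getElem_dropLast]
    have hdrop : Pop.dropLast.drop i = Pop.dropLast[i] :: Pop.dropLast.drop (i + 1) :=
      List.drop_eq_getElem_cons hlt
    rw [dif_pos h, hget, hdrop, pvScan]
    by_cases h1 : n = Pop.dropLast[i]
    · rw [if_pos h1, if_pos h1]
    · rw [if_neg h1, if_neg h1]
      by_cases h2 : p = Pop.dropLast[i]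
      · rw [if_pos h2, if_pos h2]
      · rw [if_neg h2, if_neg h2]
        exact jaFoiGo_eq_scan Pop n p (i + 1)
  · rw [dif_neg h]
    rw [List.drop_of_length_le (by simp [List.length_dropLast]; omega)]
    rfl
termination_by Pop.length - i
decreasing_by omega

-- appending an element in front shifts a first-index-or-length by one
lemma pvShift (xs : List Int) (v x : Int) (hx : v ≠ x) :
    (PySem.List.index? (x :: xs) v).getD (x :: xs).length
      = (PySem.List.index? xs v).getD xs.length + 1 := by
  rw [PySem.List.index?_cons_of_ne xs (Ne.symm hx)]
  cases PySem.List.index? xs v <;> simp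

-- the structural scan equals B's two-index comparison on any list
lemma scan_eq_alt (n p : Int) : ∀ l : List Int,
    pvScan n p l =
      (if (PySem.List.index? l n).getD l.length = l.length ∧
          (PySem.List.index? l p).getD l.length = l.length then -1
       else if (PySem.List.index? l n).getD l.length ≤ (PySem.List.index? l p).getD l.length
       then 2 else 1) := by
  intro l
  induction l with
  | nil => simp [pvScan, PySem.List.index?]
  | cons x xs ih =>
    by_cases h1 : n = x
    · subst h1
      rw [pvScan, if_pos rfl, PySem.List.index?_cons_self]
      rw [if_neg (by simp), if_pos (by simp)]
    · by_cases h2 : p = x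
      · subst h2
        rw [pvScan, if_neg h1, if_pos rfl, pvShift xs n p h1, PySem.List.index?_cons_self]
        rw [if_neg (by simp), if_neg (by simp)]
      · rw [pvScan, if_neg h1, if_neg h2, ih,
            pvShift xs n x h1, pvShift xs p x h2]
        set a := (PySem.List.index? xs n).getD xs.length with ha
        set b := (PySem.List.index? xs p).getD xs.length with hb
        have e1 : (a + 1 = (x :: xs).length ∧ b + 1 = (x :: xs).length)
            ↔ (a = xs.length ∧ b = xs.length) := by simp
        have e2 : (a + 1 ≤ b + 1) ↔ (a ≤ b) := by omega
        simp only [e1, e2]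

-- ===== VERDICT (by name: the statement is the Claim_ definition above) =====
theorem JaFoi_spec : Claim_equal_JaFoi := by
  intro Pop n p _
  unfold Spec_JaFoi JaFoi JaFoi_alt
  rw [jaFoiGo_eq_scan Pop n p 0]
  simp only [List.drop_zero, PySem.List.slice_to_neg_one]
  exact scan_eq_alt n p Pop.dropLast
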